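-- pv_equiv track=rewrite | github.com/Grechka235/Infa-MF-1-6 | 6A.py | find_K_and_P
-- ===== SOURCE A (Python) =====
-- def find_K_and_P(arr):
--     K = 0
--     P = 1
--     for num in arr:
--         if num > 2:
--             break
--         K += 1
--         P *= num
--     return K, P
-- ===== SOURCE B (Python) =====
-- def find_K_and_P(arr):
--     # Structural recursion: the answer for arr is built from the answer for its
--     # tail on the way back up, with no accumulator, break or prefix extraction.
--     if not arr or arr[0] > 2:
--         return 0, 1
--     k, p = find_K_and_P(arr[1:])
--     return k + 1, arr[0] * p
-- ===== Notes on version B (the rewrite author's own statement) =====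
-- stated objective: alternative
-- what changed: Replaced A's forward loop with a break and (K,P) accumulators by structural recursion on the list that combines the tail's result on the way back up, with no mutable state.
import Mathlib
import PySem

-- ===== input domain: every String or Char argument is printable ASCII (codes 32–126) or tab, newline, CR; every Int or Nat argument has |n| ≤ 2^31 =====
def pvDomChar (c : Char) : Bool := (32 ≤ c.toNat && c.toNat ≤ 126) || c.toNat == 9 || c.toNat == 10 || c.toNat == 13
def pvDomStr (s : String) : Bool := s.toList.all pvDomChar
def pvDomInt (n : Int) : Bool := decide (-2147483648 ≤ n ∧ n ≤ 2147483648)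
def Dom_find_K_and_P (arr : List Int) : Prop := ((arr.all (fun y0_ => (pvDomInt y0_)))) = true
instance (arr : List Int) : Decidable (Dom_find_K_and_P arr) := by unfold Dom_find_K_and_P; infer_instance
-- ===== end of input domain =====

-- B replaces A's forward accumulate-and-break loop by structural recursion that
-- combines the tail's (K, P) on the way back up; alternative decomposition, same cost.

-- ===== PORT A =====
-- the for-loop with break: structural recursion over arr carrying (K, P)
def findKPLoop (arr : List Int) (K : Int) (P : Int) : Int × Int :=
  match arr with
  | [] => (K, P)
  | num :: rest =>
    if num > 2 then (K, P)
    else findKPLoop rest (K + 1) (P * num)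

def find_K_and_P (arr : List Int) : Int × Int :=
  findKPLoop arr 0 1

-- ===== PORT B =====
def find_K_and_P_alt (arr : List Int) : Int × Int :=
  match arr with
  | [] => (0, 1)
  | x :: rest =>
    if x > 2 then (0, 1)
    else
      let kp := find_K_and_P_alt rest
      (kp.1 + 1, x * kp.2)

-- ===== PRECONDITION & SPEC =====
def Spec_find_K_and_P (arr : List Int) (out : Int × Int) : Prop := out = find_K_and_P_alt arr
instance (arr : List Int) (out : Int × Int) : Decidable (Spec_find_K_and_P arr out) := by unfold Spec_find_K_and_P; infer_instance

-- ===== CLAIM =====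
def Claim_equal_find_K_and_P : Prop := ∀ (arr : List Int), Dom_find_K_and_P arr → Spec_find_K_and_P arr (find_K_and_P arr)

-- ===== LEMMAS AND PROOFS =====
theorem findKPLoop_eq (arr : List Int) (K P : Int) :
    findKPLoop arr K P =
      (K + (find_K_and_P_alt arr).1, P * (find_K_and_P_alt arr).2) := by
  induction arr generalizing K P with
  | nil => simp [findKPLoop, find_K_and_P_alt]
  | cons num rest ih =>
    by_cases h : num > 2
    · simp [findKPLoop, find_K_and_P_alt, h]
    · simp only [findKPLoop, find_K_and_P_alt, if_neg h]
      rw [ih]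
      refine Prod.ext ?_ ?_ <;> simp <;> ring

-- ===== VERDICT =====
theorem find_K_and_P_spec : Claim_equal_find_K_and_P := by
  intro arr _
  unfold Spec_find_K_and_P find_K_and_P
  rw [findKPLoop_eq]
  simp
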